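-- pv_equiv track=rewrite | github.com/Abhi07031111/ESG_Green_bond | Job117.py | get_all_chains
-- ===== SOURCE A (Python) =====
-- def get_all_chains(job, dependency_map, visited=None):
--     if visited is None:
--         visited = set()
--
--     if job in visited:
--         return [[job + " (Cycle Detected)"]]
--
--     visited.add(job)
--
--     if job not in dependency_map or not dependency_map[job]:
--         return [[job]]
--
--     chains = []
--     for dependent in dependency_map[job]:
--         sub_chains = get_all_chains(dependent, dependency_map, visited.copy())
--         for chain in sub_chains:
--             chains.append([job] + chain)
--
--     return chains
-- ===== SOURCE B (Python) =====
-- def get_all_chains(job, dependency_map, visited=None):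
--     # Top-down accumulator recursion: carries the path prefix down and appends
--     # each finished chain to a shared results list, instead of A's bottom-up
--     # prepending of job to every sub-chain. Does not mutate the caller's visited set.
--     results = []
--
--     def walk(j, path, vis):
--         if j in vis:
--             results.append(path + [j + " (Cycle Detected)"])
--             return
--         deps = dependency_map.get(j)
--         if not deps:
--             results.append(path + [j])
--             return
--         vis = vis | {j}
--         for d in deps:
--             walk(d, path + [j], vis)
--
--     walk(job, [], set() if visited is None else set(visited))
--     return results
-- ===== Notes on version B (the rewrite author's own statement) =====
-- stated objective: alternative
-- what changed: A builds each chain bottom-up, prepending job to every chain returned by the recursive calls; B is a top-down accumulator recursion that carries the path prefix downward and appends each finished chain directly to a shared results list, with a single dict .get replacing A's membership-plus-index pair.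
import Mathlib
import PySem

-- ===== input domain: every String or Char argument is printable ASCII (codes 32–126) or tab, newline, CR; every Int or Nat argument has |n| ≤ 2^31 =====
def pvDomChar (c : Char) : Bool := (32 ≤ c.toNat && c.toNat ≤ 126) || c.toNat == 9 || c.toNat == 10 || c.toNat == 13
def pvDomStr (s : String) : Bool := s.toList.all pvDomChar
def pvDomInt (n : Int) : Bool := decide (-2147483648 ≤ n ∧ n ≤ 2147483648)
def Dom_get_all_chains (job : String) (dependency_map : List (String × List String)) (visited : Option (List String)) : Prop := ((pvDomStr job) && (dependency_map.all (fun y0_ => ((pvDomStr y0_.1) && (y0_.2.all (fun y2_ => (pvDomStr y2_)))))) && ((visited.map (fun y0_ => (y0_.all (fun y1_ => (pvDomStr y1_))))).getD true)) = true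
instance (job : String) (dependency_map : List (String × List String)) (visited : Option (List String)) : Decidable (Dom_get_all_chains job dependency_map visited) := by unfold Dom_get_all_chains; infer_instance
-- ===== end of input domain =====

-- B replaces A's bottom-up recursion (prepending job to every sub-chain) by a top-down
-- accumulator recursion carrying the path prefix (objective: alternative).  Python A mutates
-- the visited set it was passed (`visited.add(job)`); B does not — the equivalence proved
-- here is about the RETURN value only.

-- ===== PORT A =====
-- termination bookkeeping for A's port: number of dict entries whose key is not yet visited
def pvKeysLeft (dm : List (String × List String)) (vis : List String) : Nat :=
  dm.countP (fun p => !(PySem.Set.contains vis p.1))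

lemma pv_get?_mem (dm : List (String × List String)) (k : String) (v : List String)
    (h : (PySem.Dict.mk dm).get? k = some v) : (k, v) ∈ dm := by
  unfold PySem.Dict.get? at h
  cases hf : List.find? (fun p => p.1 == k) (PySem.Dict.mk dm).items with
  | none => rw [hf] at h; simp at h
  | some p =>
    rw [hf] at h
    have hp : p.1 = k := by simpa using List.find?_some hf
    have hm : p ∈ dm := List.mem_of_find?_eq_some hf
    simp only [Option.map_some, Option.some.injEq] at h
    cases p
    simp_all

lemma pv_countP_lt {α : Type} (p q : α → Bool) (l : List α)
    (h : ∀ a ∈ l, p a = true → q a = true)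
    (x : α) (hx : x ∈ l) (hq : q x = true) (hp : p x = false) :
    l.countP p < l.countP q := by
  induction l with
  | nil => simp at hx
  | cons a t ih =>
    rcases List.mem_cons.mp hx with rfl | hx
    · have hmono : t.countP p ≤ t.countP q :=
        List.countP_mono_left (fun b hb hpb => h b (List.mem_cons_of_mem _ hb) hpb)
      simp [hp, hq]
      omega
    · have ht := ih (fun b hb => h b (List.mem_cons_of_mem _ hb)) hx
      by_cases hpa : p a = true
      · have hqa := h a (List.mem_cons_self ..) hpa
        simp [hpa, hqa]
        omega
      · simp only [Bool.not_eq_true] at hpa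
        simp [List.countP_cons, hpa]
        split <;> omega

lemma pvKeysLeft_add_lt (dm : List (String × List String)) (job : String) (deps : List String)
    (vis : List String) (hc : PySem.Set.contains vis job = false)
    (hg : (PySem.Dict.mk dm).get? job = some deps) :
    pvKeysLeft dm (PySem.Set.add vis job) < pvKeysLeft dm vis := by
  unfold pvKeysLeft
  have hjv : job ∉ vis := by simpa [PySem.Set.contains] using hc
  refine pv_countP_lt _ _ dm ?_ (job, deps) (pv_get?_mem dm job deps hg) ?_ ?_
  · intro a _ hpa
    simp only [Bool.not_eq_true', PySem.Set.contains, List.contains_eq_mem,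
      decide_eq_false_iff_not] at hpa ⊢
    exact fun hmem => hpa ((PySem.Set.mem_add vis job a.1).mpr (Or.inl hmem))
  · simp [PySem.Set.contains, hjv]
  · simp [PySem.Set.contains, PySem.Set.mem_add]

-- literal port of A's recursive body; `get_all_chains` below handles the `visited=None` default.
-- visited is a Python set (PySem.Set); A passes visited.copy() to each recursive call (a pure
-- value here, so the copy is the value itself).
def pvGoA (dm : List (String × List String)) (job : String) (vis : List String) :
    List (List String) :=
  if PySem.Set.contains vis job then [[job ++ " (Cycle Detected)"]]
  else
    let vis' := PySem.Set.add vis job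
    match hg : (PySem.Dict.mk dm).get? job with
    | none => [[job]]
    | some deps =>
      if deps.isEmpty then [[job]]
      else
        deps.foldl (fun chains dependent =>
          chains ++ (pvGoA dm dependent vis').map (fun chain => job :: chain)) []
termination_by pvKeysLeft dm vis
decreasing_by
  exact pvKeysLeft_add_lt dm job deps vis (by simp_all) hg

def get_all_chains (job : String) (dependency_map : List (String × List String))
    (visited : Option (List String)) : List (List String) :=
  pvGoA dependency_map job (match visited with | none => [] | some l => l)

-- ===== PORT B =====
-- Source B's inner `walk`: top-down recursion over (job, path, visited) that appends finished
-- chains to the results accumulator.  The Nat parameter is pure fuel — a totality guard only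
-- (each recursive call visits a fresh dict key, so dm.length + 1 fuel is always enough;
-- proved in pvWalkB_spec below); it changes no computed value.
def pvWalkB (dm : List (String × List String)) :
    Nat → String → List String → List String → List (List String) → List (List String)
  | 0, _, _, _, results => results
  | fuel + 1, j, path, vis, results =>
    if PySem.Set.contains vis j then results ++ [path ++ [j ++ " (Cycle Detected)"]]
    else
      match (PySem.Dict.mk dm).get? j with
      | none => results ++ [path ++ [j]]
      | some deps =>
        if deps.isEmpty then results ++ [path ++ [j]]
        else
          deps.foldl
            (fun r d => pvWalkB dm fuel d (path ++ [j]) (PySem.Set.add vis j) r) results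

def get_all_chains_alt (job : String) (dependency_map : List (String × List String))
    (visited : Option (List String)) : List (List String) :=
  pvWalkB dependency_map (dependency_map.length + 1) job []
    (match visited with | none => [] | some l => PySem.Set.ofList l) []

-- ===== PRECONDITION & SPEC =====
-- (no Pre_: the behavioural convention passes `visited` as a Python set, on which A returns
-- normally for every admitted input)
def Spec_get_all_chains (job : String) (dependency_map : List (String × List String)) (visited : Option (List String)) (out : List (List String)) : Prop := out = get_all_chains_alt job dependency_map visited
instance (job : String) (dependency_map : List (String × List String)) (visited : Option (List String)) (out : List (List String)) : Decidable (Spec_get_all_chains job dependency_map visited out) := by unfold Spec_get_all_chains; infer_instance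

-- ===== CLAIM (what is proved, stated in full; the proofs are below) =====
def Claim_equal_get_all_chains : Prop := ∀ (job : String) (dependency_map : List (String × List String)) (visited : Option (List String)), Dom_get_all_chains job dependency_map visited → Spec_get_all_chains job dependency_map visited (get_all_chains job dependency_map visited)

-- ===== LEMMAS AND PROOFS =====

-- branch-step equations for pvGoA (A's recursion)
lemma pvGoA_cycle (dm : List (String × List String)) (job : String) (vis : List String)
    (h : PySem.Set.contains vis job = true) :
    pvGoA dm job vis = [[job ++ " (Cycle Detected)"]] := by
  have h' : job ∈ vis := by simpa [PySem.Set.contains] using h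
  rw [pvGoA]; simp [h']

lemma pvGoA_leaf_none (dm : List (String × List String)) (job : String) (vis : List String)
    (hc : PySem.Set.contains vis job = false)
    (hg : (PySem.Dict.mk dm).get? job = none) :
    pvGoA dm job vis = [[job]] := by
  have h' : job ∉ vis := by simpa [PySem.Set.contains] using hc
  rw [pvGoA]
  simp only [if_neg (by simp [PySem.Set.contains, h'] : ¬ PySem.Set.contains vis job = true)]
  split
  · rfl
  · simp_all

lemma pvGoA_leaf_empty (dm : List (String × List String)) (job : String) (vis : List String)
    (deps : List String) (hc : PySem.Set.contains vis job = false)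
    (hg : (PySem.Dict.mk dm).get? job = some deps) (he : deps.isEmpty = true) :
    pvGoA dm job vis = [[job]] := by
  have h' : job ∉ vis := by simpa [PySem.Set.contains] using hc
  have he' : deps = [] := by simpa using he
  rw [pvGoA]
  simp only [if_neg (by simp [PySem.Set.contains, h'] : ¬ PySem.Set.contains vis job = true)]
  split
  · rfl
  · rename_i deps2 hg2
    rw [hg] at hg2
    injection hg2 with hh
    subst hh
    simp [he']

lemma pvGoA_step (dm : List (String × List String)) (job : String) (vis : List String)
    (deps : List String) (hc : PySem.Set.contains vis job = false)
    (hg : (PySem.Dict.mk dm).get? job = some deps) (he : deps.isEmpty = false) :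
    pvGoA dm job vis
      = deps.flatMap (fun d =>
          (pvGoA dm d (PySem.Set.add vis job)).map (fun chain => job :: chain)) := by
  have h' : job ∉ vis := by simpa [PySem.Set.contains] using hc
  have he' : deps ≠ [] := by simpa using he
  rw [pvGoA]
  simp only [if_neg (by simp [PySem.Set.contains, h'] : ¬ PySem.Set.contains vis job = true)]
  split
  · simp_all
  · rename_i deps2 hg2
    rw [hg] at hg2
    injection hg2 with hh
    subst hh
    rw [if_neg (by simp [he'] : ¬ deps.isEmpty = true)]
    rw [PySem.List.foldl_append_eq_flatMap]
    simp

-- a fold that threads an append-only accumulator equals the accumulator ++ flatMap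
lemma pv_foldl_flip {α β : Type} (F : α → List β → List β) (g : α → List β)
    (h : ∀ d r, F d r = r ++ g d) :
    ∀ (deps : List α) (results : List β),
      deps.foldl (fun r d => F d r) results = results ++ deps.flatMap g := by
  intro deps
  induction deps with
  | nil => simp
  | cons a t ih => intro results; simp [h, List.flatMap, List.append_assoc]

-- the fuel-adequacy invariant: with fuel above the unvisited-key count, pvWalkB emits exactly
-- the chains A's recursion produces, each prefixed with the accumulated path
lemma pvWalkB_spec (dm : List (String × List String)) :
    ∀ (fuel : Nat) (j : String) (path vis : List String) (results : List (List String)),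
      pvKeysLeft dm vis < fuel →
      pvWalkB dm fuel j path vis results
        = results ++ (pvGoA dm j vis).map (fun c => path ++ c) := by
  intro fuel
  induction fuel with
  | zero => intro j path vis results hlt; omega
  | succ n ih =>
    intro j path vis results hlt
    rw [pvWalkB]
    cases hc : PySem.Set.contains vis j with
    | true => rw [if_pos rfl, pvGoA_cycle dm j vis hc]; simp
    | false =>
      rw [if_neg (by simp)]
      cases hg : (PySem.Dict.mk dm).get? j with
      | none => dsimp only; rw [pvGoA_leaf_none dm j vis hc hg]; simp
      | some deps =>
        dsimp only
        cases he : deps.isEmpty with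
        | true =>
          rw [if_pos rfl, pvGoA_leaf_empty dm j vis deps hc hg he]; simp
        | false =>
          rw [if_neg (by simp)]
          have hdec := pvKeysLeft_add_lt dm j deps vis hc hg
          rw [pv_foldl_flip
            (fun d r => pvWalkB dm n d (path ++ [j]) (PySem.Set.add vis j) r)
            (fun d => (pvGoA dm d (PySem.Set.add vis j)).map (fun c => (path ++ [j]) ++ c))
            (fun d r => ih d (path ++ [j]) (PySem.Set.add vis j) r (by omega))]
          rw [pvGoA_step dm j vis deps hc hg he]
          simp [List.map_flatMap, List.map_map, Function.comp_def, List.append_assoc]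

-- pvGoA depends on its visited set only through membership, so A run on the raw list and
-- B run on the deduplicated set produce the same chains
lemma pv_contains_eq (v1 v2 : List String) (h : ∀ x, x ∈ v1 ↔ x ∈ v2) (y : String) :
    PySem.Set.contains v1 y = PySem.Set.contains v2 y := by
  by_cases hy : y ∈ v1
  · have h2 := (h y).mp hy
    simp [PySem.Set.contains, hy, h2]
  · have h2 : y ∉ v2 := fun hx => hy ((h y).mpr hx)
    simp [PySem.Set.contains, hy, h2]

lemma pvGoA_congr (dm : List (String × List String)) :
    ∀ (n : Nat) (job : String) (v1 v2 : List String),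
      pvKeysLeft dm v1 ≤ n → (∀ x, x ∈ v1 ↔ x ∈ v2) →
      pvGoA dm job v1 = pvGoA dm job v2 := by
  intro n
  induction n with
  | zero =>
    intro job v1 v2 hn h
    cases hc : PySem.Set.contains v1 job with
    | true =>
      have hc2 : PySem.Set.contains v2 job = true := by
        rw [← pv_contains_eq v1 v2 h job]; exact hc
      rw [pvGoA_cycle dm job v1 hc, pvGoA_cycle dm job v2 hc2]
    | false =>
      have hc2 : PySem.Set.contains v2 job = false := by
        rw [← pv_contains_eq v1 v2 h job]; exact hc
      cases hg : (PySem.Dict.mk dm).get? job with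
      | none => rw [pvGoA_leaf_none dm job v1 hc hg, pvGoA_leaf_none dm job v2 hc2 hg]
      | some deps =>
        cases he : deps.isEmpty with
        | true =>
          rw [pvGoA_leaf_empty dm job v1 deps hc hg he,
            pvGoA_leaf_empty dm job v2 deps hc2 hg he]
        | false =>
          have hlt := pvKeysLeft_add_lt dm job deps v1 hc hg
          omega
  | succ n ih =>
    intro job v1 v2 hn h
    cases hc : PySem.Set.contains v1 job with
    | true =>
      have hc2 : PySem.Set.contains v2 job = true := by
        rw [← pv_contains_eq v1 v2 h job]; exact hc
      rw [pvGoA_cycle dm job v1 hc, pvGoA_cycle dm job v2 hc2]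
    | false =>
      have hc2 : PySem.Set.contains v2 job = false := by
        rw [← pv_contains_eq v1 v2 h job]; exact hc
      cases hg : (PySem.Dict.mk dm).get? job with
      | none => rw [pvGoA_leaf_none dm job v1 hc hg, pvGoA_leaf_none dm job v2 hc2 hg]
      | some deps =>
        cases he : deps.isEmpty with
        | true =>
          rw [pvGoA_leaf_empty dm job v1 deps hc hg he,
            pvGoA_leaf_empty dm job v2 deps hc2 hg he]
        | false =>
          have hlt := pvKeysLeft_add_lt dm job deps v1 hc hg
          rw [pvGoA_step dm job v1 deps hc hg he, pvGoA_step dm job v2 deps hc2 hg he]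
          have hrec : ∀ d, pvGoA dm d (PySem.Set.add v1 job) = pvGoA dm d (PySem.Set.add v2 job) :=
            fun d => ih d (PySem.Set.add v1 job) (PySem.Set.add v2 job) (by omega)
              (fun x => by simp only [PySem.Set.mem_add, h x])
          simp only [hrec]

lemma pvKeysLeft_le (dm : List (String × List String)) (vis : List String) :
    pvKeysLeft dm vis ≤ dm.length :=
  List.countP_le_length

-- ===== VERDICT (by name: the statement is the Claim_ definition above) =====
theorem get_all_chains_spec : Claim_equal_get_all_chains := by
  intro job dm visited _dom
  unfold Spec_get_all_chains get_all_chains get_all_chains_alt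
  cases visited with
  | none =>
    dsimp only
    rw [pvWalkB_spec dm (dm.length + 1) job [] [] []
      (by have := pvKeysLeft_le dm []; omega)]
    simp
  | some l =>
    dsimp only
    rw [pvWalkB_spec dm (dm.length + 1) job [] (PySem.Set.ofList l) []
      (by have := pvKeysLeft_le dm (PySem.Set.ofList l); omega)]
    have hcongr := pvGoA_congr dm (pvKeysLeft dm (PySem.Set.ofList l)) job
      (PySem.Set.ofList l) l (le_refl _) (fun x => PySem.Set.mem_ofList l x)
    simp [hcongr]
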